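-- pv_equiv track=rewrite | github.com/benquick123/code-profiling | code/batch-2/vse-naloge-brez-testov/DN6-Z-024.py | zadnji_tvit
-- ===== SOURCE A (Python) =====
-- def zadnji_tvit(tviti):
--   slovar={}
--   for tvit in tviti:
--     a=tvit.split(':')
--     avtor=a[0]
--     besedilo=(':'.join(a[1:])).strip()
--     slovar[avtor]=besedilo
--   return slovar
-- ===== SOURCE B (Python) =====
-- def zadnji_tvit(tviti):
--     # Different algorithm: for each author at their FIRST tweet, scan the list
--     # backwards for that author's LAST tweet; single dict insert per author.
--     vrstice = list(tviti)
--     rezultat = {}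
--     for tvit in vrstice:
--         avtor = tvit.split(':')[0]
--         if avtor in rezultat:
--             continue
--         for kandidat in reversed(vrstice):
--             b = kandidat.split(':')
--             if b[0] == avtor:
--                 rezultat[avtor] = (':'.join(b[1:])).strip()
--                 break
--     return rezultat
-- ===== Notes on version B (the rewrite author's own statement) =====
-- stated objective: alternative
-- what changed: A builds the dict in one pass with last-write-wins overwriting; B instead inserts each author exactly once at their first occurrence, finding that author's last tweet by a backwards scan of the list.
import Mathlib
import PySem

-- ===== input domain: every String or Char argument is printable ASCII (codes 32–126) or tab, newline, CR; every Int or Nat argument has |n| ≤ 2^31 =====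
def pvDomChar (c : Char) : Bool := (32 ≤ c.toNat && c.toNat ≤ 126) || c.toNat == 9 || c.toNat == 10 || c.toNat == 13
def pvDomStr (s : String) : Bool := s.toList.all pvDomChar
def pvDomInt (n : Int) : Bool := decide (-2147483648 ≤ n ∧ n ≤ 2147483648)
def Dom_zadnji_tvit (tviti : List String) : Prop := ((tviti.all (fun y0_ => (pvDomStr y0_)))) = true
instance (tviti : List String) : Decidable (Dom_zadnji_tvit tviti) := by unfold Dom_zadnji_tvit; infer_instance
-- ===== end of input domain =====

-- B replaces A's last-write-wins dict overwriting by a first-occurrence scan that finds each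
-- author's last tweet with a backwards search (alternative decomposition; one insert per author).

-- ===== PORT A =====
-- the parsing both Pythons perform on a tweet line: avtor = tvit.split(':')[0],
-- besedilo = (':'.join(tvit.split(':')[1:])).strip()   (sep ':' ≠ '' so split? is `some`;
-- split always returns a nonempty list, so [0] is its head)
def pvAvtor (tvit : String) : String := ((PySem.Str.split? tvit ":").getD []).headD ""
def pvBesedilo (tvit : String) : String :=
  PySem.Str.strip (PySem.Str.join ":" (((PySem.Str.split? tvit ":").getD []).drop 1))

def zadnji_tvit (tviti : List String) : List (String × String) :=
  (tviti.foldl (fun slovar tvit => slovar.insert (pvAvtor tvit) (pvBesedilo tvit))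
    PySem.Dict.empty).items

-- ===== PORT B =====
-- inner loop of Source B: `for kandidat in reversed(vrstice): … break` — first hit from the end
def pvZadnjeBesedilo (avtor : String) (vrstice : List String) : Option String :=
  vrstice.reverse.findSome? (fun kandidat =>
    if pvAvtor kandidat == avtor then some (pvBesedilo kandidat) else none)

def zadnji_tvit_alt (tviti : List String) : List (String × String) :=
  (tviti.foldl (fun rezultat tvit =>
      if rezultat.contains (pvAvtor tvit) then rezultat   -- `if avtor in rezultat: continue`
      else match pvZadnjeBesedilo (pvAvtor tvit) tviti with
        | some bes => rezultat.insert (pvAvtor tvit) bes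
        | none => rezultat)                               -- unreachable: tvit itself matches
    PySem.Dict.empty).items

-- ===== PRECONDITION & SPEC =====
def Spec_zadnji_tvit (tviti : List String) (out : List (String × String)) : Prop := out = zadnji_tvit_alt tviti
instance (tviti : List String) (out : List (String × String)) : Decidable (Spec_zadnji_tvit tviti out) := by unfold Spec_zadnji_tvit; infer_instance

-- ===== CLAIM (what is proved, stated in full; the proofs are below) =====
def Claim_equal_zadnji_tvit : Prop := ∀ (tviti : List String), Dom_zadnji_tvit tviti → Spec_zadnji_tvit tviti (zadnji_tvit tviti)

-- ===== LEMMAS AND PROOFS =====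

theorem dedup_append_singleton (q : List String) (x : String) :
    PySem.List.dedup (q ++ [x]) = if x ∈ q then PySem.List.dedup q else PySem.List.dedup q ++ [x] := by
  have h : x ∈ PySem.Set.ofList q ↔ x ∈ q := PySem.Set.mem_ofList q x
  have hc : (PySem.Set.ofList q).contains x = true ↔ x ∈ q := by
    rw [PySem.Set.contains_iff]; exact h
  simp only [PySem.List.dedup, PySem.Set.ofList, List.foldl_append, List.foldl_cons, List.foldl_nil,
    PySem.Set.add]
  simp only [PySem.Set.ofList] at hc
  split_ifs with h1 h2 h3 <;> first | rfl | (exfalso; tauto)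

theorem zadnjeBesedilo_cons (k t : String) (L : List String) :
    pvZadnjeBesedilo k (t :: L) =
      (pvZadnjeBesedilo k L).or (if pvAvtor t == k then some (pvBesedilo t) else none) := by
  simp [pvZadnjeBesedilo, List.reverse_cons, List.findSome?_append]

theorem zadnjeBesedilo_mem (t : String) (L : List String) (ht : t ∈ L) :
    ∃ v, pvZadnjeBesedilo (pvAvtor t) L = some v := by
  cases hv : pvZadnjeBesedilo (pvAvtor t) L with
  | some v => exact ⟨v, rfl⟩
  | none =>
    exfalso
    rw [pvZadnjeBesedilo, List.findSome?_eq_none_iff] at hv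
    have := hv t (List.mem_reverse.mpr ht)
    simp at this

-- A's fold looks up the LAST occurrence: getD after the fold is pvZadnjeBesedilo
theorem foldA_getD (L : List String) (d : PySem.Dict String String) (k : String) :
    (L.foldl (fun slovar tvit => slovar.insert (pvAvtor tvit) (pvBesedilo tvit)) d).getD k ""
      = (pvZadnjeBesedilo k L).getD (d.getD k "") := by
  induction L generalizing d with
  | nil => simp [pvZadnjeBesedilo]
  | cons t L ih =>
    rw [List.foldl_cons, ih, zadnjeBesedilo_cons]
    cases hv : pvZadnjeBesedilo k L with
    | some v => simp
    | none =>
      by_cases hk : pvAvtor t = k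
      · simp [hk, PySem.Dict.getD_insert_self]
      · simp [hk, PySem.Dict.getD_insert_of_ne _ _ _ (Ne.symm hk)]

-- B's loop invariant: after processing a prefix whose authors (deduplicated) are q, the dict's
-- items are the first occurrences in q, each mapped to its last text in the full list L
theorem foldB_items (L : List String) (s : List String) (q : List String)
    (hs : ∀ t ∈ s, t ∈ L) :
    (s.foldl (fun rezultat tvit =>
        if rezultat.contains (pvAvtor tvit) then rezultat
        else match pvZadnjeBesedilo (pvAvtor tvit) L with
          | some bes => rezultat.insert (pvAvtor tvit) bes
          | none => rezultat)
      (PySem.Dict.mk ((PySem.List.dedup q).map (fun k => (k, (pvZadnjeBesedilo k L).getD ""))))).items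
      = (PySem.List.dedup (q ++ s.map pvAvtor)).map (fun k => (k, (pvZadnjeBesedilo k L).getD "")) := by
  induction s generalizing q with
  | nil => simp
  | cons t s ih =>
    have ht : t ∈ L := hs t (List.mem_cons_self)
    have hs' : ∀ u ∈ s, u ∈ L := fun u hu => hs u (List.mem_cons_of_mem _ hu)
    have hkeys : (PySem.Dict.mk ((PySem.List.dedup q).map
        (fun k => (k, (pvZadnjeBesedilo k L).getD "")))).keys = PySem.List.dedup q := by
      simp [PySem.Dict.keys, Function.comp_def]
    have hcont : (PySem.Dict.mk ((PySem.List.dedup q).map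
        (fun k => (k, (pvZadnjeBesedilo k L).getD "")))).contains (pvAvtor t)
        = decide (pvAvtor t ∈ q) := by
      rw [PySem.Dict.contains_eq_decide_mem_keys, hkeys]
      simp
    rw [List.foldl_cons]
    by_cases hmem : pvAvtor t ∈ q
    · simp only [hcont, hmem, decide_true, if_true]
      rw [ih _ hs', List.map_cons, List.append_cons]
      have hq : PySem.List.dedup (q ++ [pvAvtor t]) = PySem.List.dedup q := by
        rw [dedup_append_singleton, if_pos hmem]
      have hq2 : PySem.List.dedup ((q ++ [pvAvtor t]) ++ s.map pvAvtor)
          = PySem.List.dedup (q ++ s.map pvAvtor) := by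
        simp only [PySem.List.dedup, PySem.Set.ofList, List.foldl_append] at hq ⊢
        rw [hq]
      rw [hq2]
    · obtain ⟨v, hv⟩ := zadnjeBesedilo_mem t L ht
      simp only [hcont, hmem, decide_false, Bool.false_eq_true, if_false, hv]
      have hd : (PySem.Dict.mk ((PySem.List.dedup q).map
            (fun k => (k, (pvZadnjeBesedilo k L).getD "")))).insert (pvAvtor t) v
          = PySem.Dict.mk ((PySem.List.dedup (q ++ [pvAvtor t])).map
            (fun k => (k, (pvZadnjeBesedilo k L).getD ""))) := by
        apply PySem.Dict.ext
        rw [PySem.Dict.items_insert_of_not_contains]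
        · rw [dedup_append_singleton, if_neg hmem, List.map_append]
          simp [hv]
        · rw [hcont]; simp [hmem]
      rw [hd, ih _ hs']
      congr 2
      simp

-- ===== VERDICT (by name: the statement is the Claim_ definition above) =====
theorem zadnji_tvit_spec : Claim_equal_zadnji_tvit := by
  intro tviti _
  unfold Spec_zadnji_tvit zadnji_tvit zadnji_tvit_alt
  -- A's side: nodup keys = deduplicated authors, values = last texts
  have hnd : (tviti.foldl (fun slovar tvit => slovar.insert (pvAvtor tvit) (pvBesedilo tvit))
      PySem.Dict.empty).keys.Nodup := by
    have := PySem.Dict.nodup_keys_foldl_insert_key (ν := String) tviti pvAvtor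
      (fun _ tvit => pvBesedilo tvit) PySem.Dict.empty (by simp [PySem.Dict.keys, PySem.Dict.empty])
    exact this
  have hkeysA : (tviti.foldl (fun slovar tvit => slovar.insert (pvAvtor tvit) (pvBesedilo tvit))
      PySem.Dict.empty).keys = PySem.List.dedup (tviti.map pvAvtor) := by
    have := PySem.Dict.keys_foldl_insert_key (ν := String) tviti pvAvtor
      (fun _ tvit => pvBesedilo tvit) PySem.Dict.empty
    rw [this]
    simp [PySem.Dict.keys, PySem.Dict.empty, PySem.Set.update, PySem.List.dedup, PySem.Set.ofList]
  rw [PySem.Dict.items_eq_map_keys _ hnd "", hkeysA]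
  -- B's side: the invariant at q = [] over the whole list
  have hB := foldB_items tviti tviti [] (fun _ h => h)
  have hempty : (PySem.Dict.empty : PySem.Dict String String)
      = PySem.Dict.mk ((PySem.List.dedup ([] : List String)).map
          (fun k => (k, (pvZadnjeBesedilo k tviti).getD ""))) := rfl
  rw [hempty, hB, List.nil_append]
  -- pointwise: A's stored value is the last text
  apply List.map_congr_left
  intro k _
  rw [foldA_getD]
  rfl
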